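-- pv_equiv track=rewrite | github.com/JulioCzar1301/PDF-Analist | src/pdf/headers.py | process_title_detection
-- ===== SOURCE A (Python) =====
-- def clean_header_text(header):
--     """Remove caracteres especiais e números do texto do cabeçalho."""
--     return header.lstrip('#').strip(' *.0123456789 ').strip()
--
-- def process_title_detection(levels):
--     """Detecta e processa título se existir um único cabeçalho do nível mínimo."""
--     min_level = min(level for level, _ in levels)
--     headers_min_level = [h for level, h in levels if level == min_level]
--
--     title = None
--     if len(headers_min_level) == 1:
--         title_text = clean_header_text(headers_min_level[0])
--         title = f"Title: {title_text}"
--         # Remove o título da lista de níveis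
--         levels = [(lvl, h) for (lvl, h) in levels if h != headers_min_level[0]]
--
--     return levels, title, min_level
-- ===== SOURCE B (Python) =====
-- def clean_header_text(header):
--     """Remove caracteres especiais e números do texto do cabeçalho."""
--     return header.lstrip('#').strip(' *.0123456789 ').strip()
--
-- def process_title_detection(levels):
--     """Single streaming pass: tracks the running minimum level, the first
--     header seen at that minimum and how many headers share it."""
--     if not levels:
--         raise ValueError("min() arg is an empty sequence")
--     (min_level, first), count = levels[0], 1
--     for lvl, h in levels[1:]:
--         if lvl < min_level:
--             min_level, first, count = lvl, h, 1
--         elif lvl == min_level: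
--             count += 1
--     if count == 1:
--         title = f"Title: {clean_header_text(first)}"
--         return [(l, x) for (l, x) in levels if x != first], title, min_level
--     return levels, None, min_level
-- ===== Notes on version B (the rewrite author's own statement) =====
-- stated objective: alternative
-- what changed: Replaces A's three separate list traversals (min(), a filter for min-level headers, then indexing it) with one streaming pass that maintains the running minimum level, the first header at it and its count, resetting on a strictly smaller level.
import Mathlib
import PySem

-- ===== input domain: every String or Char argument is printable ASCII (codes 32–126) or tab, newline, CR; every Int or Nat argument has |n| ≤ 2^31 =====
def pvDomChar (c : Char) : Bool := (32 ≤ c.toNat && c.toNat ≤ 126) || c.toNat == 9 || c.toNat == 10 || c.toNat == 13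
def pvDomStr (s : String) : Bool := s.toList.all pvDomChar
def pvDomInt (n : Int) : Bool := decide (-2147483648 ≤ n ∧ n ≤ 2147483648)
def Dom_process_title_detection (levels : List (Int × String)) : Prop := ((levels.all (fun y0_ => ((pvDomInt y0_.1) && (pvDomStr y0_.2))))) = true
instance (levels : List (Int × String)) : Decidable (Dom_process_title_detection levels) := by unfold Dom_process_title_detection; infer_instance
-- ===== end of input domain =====

-- B replaces A's three traversals (min, filter, index) by one streaming pass keeping
-- (running minimum, first header at it, count at it); same cost class, different decomposition.

-- ===== PORT A =====
-- header.lstrip('#') is ported by hand as dropWhile (· == '#'): exact, a single strip character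
def clean_header_text (header : String) : String :=
  PySem.Str.strip (PySem.Str.stripChars (String.ofList (header.toList.dropWhile (fun c => c == '#'))) " *.0123456789 ")

def process_title_detection (levels : List (Int × String)) : (List (Int × String)) × Option String × Int :=
  -- min(...) raises ValueError on empty input: excluded by Pre_; .getD 0 is unreachable there
  let min_level := (PySem.List.min? (levels.map (fun p => p.1)) (fun x => x)).getD 0
  let headers := (levels.filter (fun p => p.1 == min_level)).map (fun p => p.2)
  if headers.length == 1 then
    let h0 := (PySem.List.pyGet? headers 0).getD ""
    (levels.filter (fun p => p.2 != h0), some ("Title: " ++ clean_header_text h0), min_level)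
  else
    (levels, none, min_level)

-- ===== PORT B =====
def pvScan : Int → String → Nat → List (Int × String) → Int × String × Nat
  | m, f, c, [] => (m, f, c)
  | m, f, c, (l, h) :: rest =>
      if l < m then pvScan l h 1 rest
      else if l == m then pvScan m f (c + 1) rest
      else pvScan m f c rest

def process_title_detection_alt (levels : List (Int × String)) : (List (Int × String)) × Option String × Int :=
  match levels with
  | [] => ([], none, 0)  -- B raises ValueError here, like A; excluded by Pre_
  | (l0, h0) :: rest =>
    match pvScan l0 h0 1 rest with
    | (m, f, c) =>
      if c == 1 then
        (((l0, h0) :: rest).filter (fun p => p.2 != f), some ("Title: " ++ clean_header_text f), m)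
      else
        ((l0, h0) :: rest, none, m)

-- ===== PRECONDITION & SPEC =====
-- Python A raises ValueError (min of an empty sequence) on []: exactly that input is excluded.
def Pre_process_title_detection (levels : List (Int × String)) : Prop := levels ≠ []
instance (levels : List (Int × String)) : Decidable (Pre_process_title_detection levels) := by unfold Pre_process_title_detection; infer_instance
def pvWitness_process_title_detection : (List (Int × String)) := [(1, "# Intro")]

def Spec_process_title_detection (levels : List (Int × String)) (out : (List (Int × String)) × Option String × Int) : Prop := out = process_title_detection_alt levels
instance (levels : List (Int × String)) (out : (List (Int × String)) × Option String × Int) : Decidable (Spec_process_title_detection levels out) := by unfold Spec_process_title_detection; infer_instance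

-- ===== CLAIM (what is proved, stated in full; the proofs are below) =====
def Claim_equal_process_title_detection : Prop := ∀ (levels : List (Int × String)), Dom_process_title_detection levels → Pre_process_title_detection levels → Spec_process_title_detection levels (process_title_detection levels)

-- ===== LEMMAS AND PROOFS =====

theorem pvFoldlMinLe (xs : List Int) : ∀ m : Int, xs.foldl min m ≤ m := by
  induction xs with
  | nil => intro m; simp
  | cons x t ih => intro m; exact le_trans (ih (min m x)) (min_le_left _ _)

theorem pvScanSpec (rest : List (Int × String)) : ∀ (m : Int) (f : String) (c : Nat),
    pvScan m f c rest =
      ((rest.map Prod.fst).foldl min m,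
       (if (rest.map Prod.fst).foldl min m = m then f
        else ((rest.filter (fun p => p.1 == (rest.map Prod.fst).foldl min m)).map Prod.snd).headD ""),
       (if (rest.map Prod.fst).foldl min m = m then c else 0) +
         (rest.filter (fun p => p.1 == (rest.map Prod.fst).foldl min m)).length) := by
  induction rest with
  | nil => intro m f c; simp [pvScan]
  | cons p t ih =>
    intro m f c
    obtain ⟨l, h⟩ := p
    have hm' : ((((l, h) :: t)).map Prod.fst).foldl min m = (t.map Prod.fst).foldl min (min m l) := by
      simp
    by_cases h1 : l < m
    · have hml : min m l = l := min_eq_right h1.le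
      have hle : (t.map Prod.fst).foldl min l ≤ l := pvFoldlMinLe _ _
      have hne : (t.map Prod.fst).foldl min l ≠ m := by omega
      simp only [pvScan, if_pos h1, ih l h 1, hm', hml]
      by_cases h2 : (t.map Prod.fst).foldl min l = l
      · have hlm : l ≠ m := by omega
        simp [h2, hlm]
        omega
      · have : ((l : Int) == (t.map Prod.fst).foldl min l) = false := by
          simp; omega
        simp [h2, hne, this]
    · by_cases h2 : l = m
      · subst h2
        have hml : min l l = l := min_self l
        simp only [pvScan, if_neg h1, beq_self_eq_true, if_pos rfl, ih l f (c + 1), hm', hml]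
        by_cases h3 : (t.map Prod.fst).foldl min l = l
        · simp [h3]
          omega
        · have : ((l : Int) == (t.map Prod.fst).foldl min l) = false := by
            simp; exact fun e => h3 e.symm
          simp [h3, this]
      · have hml : min m l = m := min_eq_left (by omega)
        have hle : (t.map Prod.fst).foldl min m ≤ m := pvFoldlMinLe _ _
        have hne : ((l : Int) == (t.map Prod.fst).foldl min m) = false := by
          simp; omega
        have hb : ((l : Int) == m) = false := by simp [h2]
        simp only [pvScan, if_neg h1, hb, if_neg (by simp [h2] : ¬ ((l:Int) == m) = true), ih m f c, hm', hml]
        simp [List.filter_cons, hne]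

-- ===== VERDICT (by name: the statement is the Claim_ definition above) =====
theorem process_title_detection_spec : Claim_equal_process_title_detection := by
  intro levels _ hpre
  unfold Spec_process_title_detection
  match levels with
  | [] => exact absurd rfl hpre
  | (l0, h0) :: rest =>
    simp only [process_title_detection, process_title_detection_alt,
      pvScanSpec rest l0 h0 1]
    have hmin : PySem.List.min? (((l0, h0) :: rest).map (fun p => p.1)) (fun x => x)
        = some ((rest.map Prod.fst).foldl min l0) := by
      have := PySem.List.min?_id_cons l0 (rest.map Prod.fst)
      simpa using this
    rw [hmin]
    have hle : (rest.map Prod.fst).foldl min l0 ≤ l0 := pvFoldlMinLe _ _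
    revert hle
    generalize (rest.map Prod.fst).foldl min l0 = M
    intro hle
    simp only [Option.getD_some]
    by_cases hc : M = l0
    · -- the head is at the minimum level: headers = h0 :: tail headers
      subst hc
      have hfc : List.filter (fun p => p.1 == M) ((M, h0) :: rest)
          = (M, h0) :: List.filter (fun p => p.1 == M) rest := by
        simp
      rw [hfc]
      by_cases hz : List.filter (fun p => p.1 == M) rest = []
      · simp [hz, PySem.List.pyGet?, PySem.List.pyIdx?]
      · have hlen : (List.filter (fun p => p.1 == M) rest).length ≠ 0 := by
          simpa using hz
        have hA : ((List.map (fun p => p.2) ((M, h0) :: List.filter (fun p => p.1 == M) rest)).length == 1) = false := by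
          simp only [List.map_cons, List.length_cons, List.length_map, beq_eq_false_iff_ne, ne_eq]
          omega
        have hB : ((if M = M then 1 else 0) + (List.filter (fun p => p.1 == M) rest).length == 1) = false := by
          rw [if_pos rfl]
          simp only [beq_eq_false_iff_ne, ne_eq]
          omega
        rw [hA, hB]
        simp
    · -- the minimum comes from the tail; the head is filtered out everywhere
      have hb : ((l0 : Int) == M) = false := by simp; omega
      have hfc : List.filter (fun p => p.1 == M) ((l0, h0) :: rest)
          = List.filter (fun p => p.1 == M) rest := by
        simp [hb]
      rw [hfc, if_neg hc]
      by_cases h1 : (List.filter (fun p => p.1 == M) rest).length = 1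
      · obtain ⟨x, hx⟩ := List.length_eq_one_iff.mp h1
        simp [hx, PySem.List.pyGet?, PySem.List.pyIdx?, hc]
      · have hA : ((List.map (fun p => p.2) (List.filter (fun p => p.1 == M) rest)).length == 1) = false := by
          simp only [List.length_map, beq_eq_false_iff_ne, ne_eq]
          omega
        have hB : ((0 + (List.filter (fun p => p.1 == M) rest).length : Nat) == 1) = false := by
          simp only [Nat.zero_add, beq_eq_false_iff_ne, ne_eq]
          omega
        rw [hA, hB]
        simp
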